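-- pv_equiv track=rewrite | github.com/samihan123/8-Queens-using-Hill-Climb | Hill_Climb_8q.py | get_h_pos
-- ===== SOURCE A (Python) =====
-- board_n = 8
--
-- def get_h_pos(board, i, j):
--     '''
--
--
--     Parameters
--     ----------
--     board : array
--         n*n chess board.
--     i : int
--         row.
--     j : int
--         column.
--
--     Returns
--     -------
--     num_of_attacks : TYPE
--         number of attack at that possition.
--
--     '''
--     num_of_attacks = 0
--     k = 1
--     j += k
--     while j < board_n:
--         if board[i][j] == 'Q':
--             num_of_attacks += 1
--         if i + k < board_n and board[i + k][j] == 'Q':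
--             num_of_attacks += 1
--         if i - k > -1 and board[i - k][j] == 'Q':
--             num_of_attacks += 1
--         k += 1
--         j += 1
--     return num_of_attacks
-- ===== SOURCE B (Python) =====
-- board_n = 8
--
-- def get_h_pos(board, i, j):
--     # Brute-force predicate scan: visit every cell of the 8x8 board slice in the
--     # open column range (j, board_n) and count cells holding 'Q' that attack (i, j)
--     # from the right (same row, or a right-going diagonal: |r - i| == c - j).
--     attacks = 0
--     for r, row in enumerate(board[:board_n]):
--         for c in range(j + 1, board_n):
--             if row[c] == 'Q' and (r == i or r - i == c - j or i - r == c - j):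
--                 attacks += 1
--     return attacks
-- ===== Notes on version B (the rewrite author's own statement) =====
-- stated objective: alternative
-- what changed: A walks one column pointer rightwards checking three targeted cells (row, down-diagonal, up-diagonal) per step; B instead brute-force scans every cell of the 8x8 board slice in the remaining columns and counts cells holding 'Q' that satisfy a geometric attack predicate (r == i or |r - i| == c - j).
import Mathlib
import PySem

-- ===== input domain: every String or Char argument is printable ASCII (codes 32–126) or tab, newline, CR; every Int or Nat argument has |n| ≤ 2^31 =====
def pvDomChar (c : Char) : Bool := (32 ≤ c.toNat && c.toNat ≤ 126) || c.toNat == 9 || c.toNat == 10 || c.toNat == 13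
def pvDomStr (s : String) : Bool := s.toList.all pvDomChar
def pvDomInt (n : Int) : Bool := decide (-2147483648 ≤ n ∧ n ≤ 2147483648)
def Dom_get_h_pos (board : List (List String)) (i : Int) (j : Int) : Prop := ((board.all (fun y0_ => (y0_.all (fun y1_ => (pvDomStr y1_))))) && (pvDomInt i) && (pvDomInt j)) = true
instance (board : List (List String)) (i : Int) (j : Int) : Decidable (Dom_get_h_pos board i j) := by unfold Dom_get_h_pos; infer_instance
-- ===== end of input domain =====

-- B replaces A's column-pointer walk checking three targeted cells per step by a
-- brute-force scan of the whole 8x8 board slice that counts 'Q' cells satisfying a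
-- geometric attack predicate; same return value on Pre_, different algorithm.

-- board[r][c] with Python's negative-index semantics; inside Pre_ every access A or B
-- performs is in range, so the defaults are never the decisive value there.
def pvCell (board : List (List String)) (r c : Int) : String :=
  PySem.List.pyGetD (PySem.List.pyGetD board r []) c ""

-- ===== PORT A =====
-- A's while-loop: state (num_of_attacks, k, j); j increases until board_n = 8.
def pvALoop (board : List (List String)) (i : Int) (num k j : Int) : Int :=
  if h : j < 8 then
    let num1 := if pvCell board i j = "Q" then num + 1 else num
    let num2 := if i + k < 8 ∧ pvCell board (i + k) j = "Q" then num1 + 1 else num1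
    let num3 := if -1 < i - k ∧ pvCell board (i - k) j = "Q" then num2 + 1 else num2
    pvALoop board i num3 (k + 1) (j + 1)
  else num
termination_by (8 - j).toNat
decreasing_by omega

def get_h_pos (board : List (List String)) (i : Int) (j : Int) : Int :=
  pvALoop board i 0 1 (j + 1)

-- ===== PORT B =====
-- Source B: for r, row in enumerate(board[:8]): for c in range(j+1, 8): if row[c] == 'Q' and pred: attacks += 1
def get_h_pos_alt (board : List (List String)) (i : Int) (j : Int) : Int :=
  (PySem.List.enumerate (PySem.List.slice board none (some 8)) 0).foldl
    (fun acc p =>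
      (PySem.List.pyRange (j + 1) 8 1).foldl
        (fun acc2 c =>
          if PySem.List.pyGetD p.2 c "" = "Q" ∧ (p.1 = i ∨ p.1 - i = c - j ∨ i - p.1 = c - j)
          then acc2 + 1 else acc2)
        acc)
    0

-- ===== PRECONDITION & SPEC =====
-- Pre_ excludes (a) inputs where the Python A raises IndexError (board shorter than the
-- hard-coded board_n = 8, a touched row shorter than 8, or j < -9 reading columns left of
-- index -8), and (b) row indices i outside the board's natural domain 0 ≤ i < 8, where A's
-- value comes from Python's negative-index wraparound or from rows beyond the 8x8 board
-- (see claim cites; on j < -9 with rows wider than 8 A also returns, and B agrees there,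
-- so Pre_ is conservative on that corner).  When 7 ≤ j the loop body never runs and nothing is read, so any
-- board and i are fine.
def Pre_get_h_pos (board : List (List String)) (i : Int) (j : Int) : Prop :=
  7 ≤ j ∨ (-9 ≤ j ∧ 0 ≤ i ∧ i < 8 ∧ 8 ≤ board.length ∧ ∀ row ∈ board.take 8, 8 ≤ row.length)
instance (board : List (List String)) (i : Int) (j : Int) : Decidable (Pre_get_h_pos board i j) := by unfold Pre_get_h_pos; infer_instance

def pvWitness_get_h_pos : List (List String) × Int × Int :=
  ([[".", ".", ".", ".", ".", ".", ".", "Q"], [".", ".", ".", ".", ".", ".", ".", "."],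
    [".", ".", ".", ".", "Q", ".", ".", "."], [".", ".", ".", ".", ".", ".", ".", "."],
    [".", ".", ".", ".", ".", ".", ".", "."], [".", ".", ".", ".", ".", ".", ".", "."],
    [".", ".", ".", ".", ".", ".", ".", "."], [".", ".", ".", ".", ".", ".", ".", "."]], 1, 2)

def Spec_get_h_pos (board : List (List String)) (i : Int) (j : Int) (out : Int) : Prop := out = get_h_pos_alt board i j
instance (board : List (List String)) (i : Int) (j : Int) (out : Int) : Decidable (Spec_get_h_pos board i j out) := by unfold Spec_get_h_pos; infer_instance

-- ===== CLAIM (what is proved, stated in full; the proofs are below) =====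
def Claim_equal_get_h_pos : Prop := ∀ (board : List (List String)) (i : Int) (j : Int), Dom_get_h_pos board i j → Pre_get_h_pos board i j → Spec_get_h_pos board i j (get_h_pos board i j)

-- ===== LEMMAS AND PROOFS =====

-- the three targeted checks A performs at column c with diagonal offset t
def pvCol (board : List (List String)) (i c t : Int) : Int :=
  (if pvCell board i c = "Q" then 1 else 0)
  + (if i + t < 8 ∧ pvCell board (i + t) c = "Q" then 1 else 0)
  + (if -1 < i - t ∧ pvCell board (i - t) c = "Q" then 1 else 0)

-- A's loop is the column-wise sum of its three targeted checks
theorem pvALoop_eq_sum (board : List (List String)) (i : Int) :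
    ∀ (n : ℕ) (j num k : Int), (8 - j).toNat ≤ n →
      pvALoop board i num k j
        = num + ((PySem.List.pyRange j 8 1).map (fun c => pvCol board i c (k + (c - j)))).sum := by
  intro n
  induction n with
  | zero =>
      intro j num k hn
      have hj : ¬ j < 8 := by omega
      rw [pvALoop, PySem.List.pyRange_one_eq_nil (by omega)]
      simp [hj]
  | succ n ih =>
      intro j num k hn
      by_cases hj : j < 8
      · rw [pvALoop, dif_pos hj, ih (j + 1) _ (k + 1) (by omega),
          PySem.List.pyRange_one_cons hj]
        have hfun : (fun c => pvCol board i c (k + 1 + (c - (j + 1))))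
            = (fun c => pvCol board i c (k + (c - j))) := by
          funext c; congr 1; ring
        rw [hfun]
        simp only [List.map_cons, List.sum_cons, pvCol]
        have : k + (j - j) = k := by ring
        rw [this]
        split_ifs <;> ring
      · rw [pvALoop, dif_neg hj, PySem.List.pyRange_one_eq_nil (by omega)]
        simp

-- a foldl that conditionally increments is the accumulator plus a 0/1 sum
theorem foldl_ite_incr {α : Type} (l : List α) (p : α → Prop) [DecidablePred p] (a : Int) :
    l.foldl (fun acc x => if p x then acc + 1 else acc) a
      = a + (l.map (fun x => if p x then (1 : Int) else 0)).sum := by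
  have h : (fun (acc : Int) x => if p x then acc + 1 else acc)
      = (fun acc x => acc + (if p x then 1 else 0)) := by
    funext acc x; split_ifs <;> ring
  rw [h, PySem.List.foldl_add]

-- double sums over lists commute
theorem sum_map_sum_comm {α β : Type} (l1 : List α) (l2 : List β) (f : α → β → Int) :
    (l1.map (fun x => (l2.map (f x)).sum)).sum
      = (l2.map (fun y => (l1.map (fun x => f x y)).sum)).sum := by
  induction l1 with
  | nil => simp
  | cons a t ih =>
      simp only [List.map_cons, List.sum_cons, ih]
      rw [← PySem.List.sum_map_add_int]

-- a 0/1 indicator over a disjunction of three disjoint row targets splits into three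
theorem ind_split (q : Prop) [Decidable q] (r i t : Int) (ht : 1 ≤ t) :
    (if q ∧ (r = i ∨ r - i = t ∨ i - r = t) then (1 : Int) else 0)
      = (if q ∧ r = i then 1 else 0) + (if q ∧ r = i + t then 1 else 0)
        + (if q ∧ r = i - t then 1 else 0) := by
  split_ifs <;> simp_all <;> omega

-- summing an indicator that pins the row to one target over a range
theorem sum_single (q : Int → Prop) [DecidablePred q] (a : Int) :
    ∀ (n : ℕ) (lo hi : Int), (hi - lo).toNat ≤ n →
      ((PySem.List.pyRange lo hi 1).map
          (fun r => if q r ∧ r = a then (1 : Int) else 0)).sum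
        = if lo ≤ a ∧ a < hi ∧ q a then 1 else 0 := by
  intro n
  induction n with
  | zero =>
      intro lo hi hn
      rw [PySem.List.pyRange_one_eq_nil (by omega)]
      have : ¬ (lo ≤ a ∧ a < hi ∧ q a) := by rintro ⟨h1, h2, _⟩; omega
      simp [this]
  | succ n ih =>
      intro lo hi hn
      by_cases hlt : lo < hi
      · rw [PySem.List.pyRange_one_cons hlt]
        simp only [List.map_cons, List.sum_cons]
        rw [ih (lo + 1) hi (by omega)]
        by_cases ha : a = lo
        · subst ha
          have : ¬ (a + 1 ≤ a ∧ a < hi ∧ q a) := by rintro ⟨h1, _, _⟩; omega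
          simp [hlt]
        · have h1 : ¬ (q lo ∧ lo = a) := by rintro ⟨_, h⟩; exact ha h.symm
          have h2 : (lo + 1 ≤ a ∧ a < hi ∧ q a) ↔ (lo ≤ a ∧ a < hi ∧ q a) := by
            constructor <;> rintro ⟨u, v, w⟩ <;> refine ⟨by omega, v, w⟩
          rw [if_neg h1, if_congr h2 rfl rfl]; ring
      · rw [PySem.List.pyRange_one_eq_nil (by omega)]
        have : ¬ (lo ≤ a ∧ a < hi ∧ q a) := by rintro ⟨h1, h2, _⟩; omega
        simp [this]

-- the column sum of B's geometric predicate over rows 0..7 equals A's three checks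
theorem colSum_eq (board : List (List String)) (c i t : Int)
    (hi0 : 0 ≤ i) (hi8 : i < 8) (ht : 1 ≤ t) :
    ((PySem.List.pyRange 0 8 1).map
        (fun r => if pvCell board r c = "Q" ∧ (r = i ∨ r - i = t ∨ i - r = t)
                  then (1 : Int) else 0)).sum
      = pvCol board i c t := by
  have hsplit : (fun r => if pvCell board r c = "Q" ∧ (r = i ∨ r - i = t ∨ i - r = t)
                  then (1 : Int) else 0)
      = (fun r => ((if pvCell board r c = "Q" ∧ r = i then (1 : Int) else 0)
          + (if pvCell board r c = "Q" ∧ r = i + t then 1 else 0))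
          + (if pvCell board r c = "Q" ∧ r = i - t then 1 else 0)) := by
    funext r
    rw [ind_split (pvCell board r c = "Q") r i t ht]
  rw [hsplit, PySem.List.sum_map_add_int, PySem.List.sum_map_add_int,
    sum_single (fun r => pvCell board r c = "Q") i 8 0 8 (by omega),
    sum_single (fun r => pvCell board r c = "Q") (i + t) 8 0 8 (by omega),
    sum_single (fun r => pvCell board r c = "Q") (i - t) 8 0 8 (by omega),
    pvCol]
  have e1 : (0 ≤ i ∧ i < 8 ∧ pvCell board i c = "Q") ↔ pvCell board i c = "Q" := by
    constructor
    · rintro ⟨_, _, h⟩; exact h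
    · intro h; exact ⟨hi0, hi8, h⟩
  have e2 : (0 ≤ i + t ∧ i + t < 8 ∧ pvCell board (i + t) c = "Q")
      ↔ (i + t < 8 ∧ pvCell board (i + t) c = "Q") := by
    constructor
    · rintro ⟨_, h1, h2⟩; exact ⟨h1, h2⟩
    · rintro ⟨h1, h2⟩; exact ⟨by omega, h1, h2⟩
  have e3 : (0 ≤ i - t ∧ i - t < 8 ∧ pvCell board (i - t) c = "Q")
      ↔ (-1 < i - t ∧ pvCell board (i - t) c = "Q") := by
    constructor
    · rintro ⟨h0, _, h2⟩; exact ⟨by omega, h2⟩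
    · rintro ⟨h1, h2⟩; exact ⟨by omega, by omega, h2⟩
  rw [if_congr e1 rfl rfl, if_congr e2 rfl rfl, if_congr e3 rfl rfl]

-- rows of the truncated board are the rows of the board (first eight rows)
theorem take8_row (board : List (List String)) (r : Int)
    (h0 : 0 ≤ r) (h8 : r < 8) (hlen : 8 ≤ board.length) :
    PySem.List.pyGetD (board.take 8) r ([] : List String)
      = PySem.List.pyGetD board r ([] : List String) := by
  have htake : (board.take 8).length = 8 := by
    simp [List.length_take]; omega
  rw [PySem.List.pyGetD_eq_getElem _ _ h0 (by rw [htake]; exact_mod_cast h8),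
    PySem.List.pyGetD_eq_getElem _ _ h0 (by omega)]
  exact List.getElem_take

-- ===== VERDICT (by name: the statement is the Claim_ definition above) =====
theorem get_h_pos_spec : Claim_equal_get_h_pos := by
  intro board i j _ hpre
  unfold Spec_get_h_pos get_h_pos get_h_pos_alt
  rcases hpre with hj | ⟨hj9, hi0, hi8, hlen, _⟩
  · -- 7 ≤ j: the column range is empty, both sides are 0
    rw [pvALoop, dif_neg (by omega), PySem.List.pyRange_one_eq_nil (by omega)]
    have hfix : ∀ (l : List (Int × List String)) (a : Int),
        l.foldl (fun acc _ => acc) a = a := by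
      intro l; induction l <;> simp_all [List.foldl]
    simp [List.foldl_nil, hfix]
  · -- main case
    have hslice : PySem.List.slice board none (some 8) = board.take 8 := by
      have := PySem.List.slice_to board (b := 8) (by omega); simpa using this
    have htake : (board.take 8).length = 8 := by
      simp [List.length_take]; omega
    have hlen8 : PySem.List.len (board.take 8) = (8 : Int) := by
      simp [PySem.List.len_eq, htake]
    -- B: inner loop becomes a 0/1 sum
    have houter : (fun (acc : Int) (p : Int × List String) =>
          (PySem.List.pyRange (j + 1) 8 1).foldl
            (fun acc2 c =>
              if PySem.List.pyGetD p.2 c "" = "Q" ∧ (p.1 = i ∨ p.1 - i = c - j ∨ i - p.1 = c - j)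
              then acc2 + 1 else acc2) acc)
        = (fun acc p => acc + ((PySem.List.pyRange (j + 1) 8 1).map
            (fun c => if PySem.List.pyGetD p.2 c "" = "Q" ∧ (p.1 = i ∨ p.1 - i = c - j ∨ i - p.1 = c - j)
              then (1 : Int) else 0)).sum) := by
      funext acc p
      exact foldl_ite_incr _ _ acc
    rw [hslice, houter, PySem.List.foldl_add,
      PySem.List.enumerate_eq_map_pyRange (board.take 8) ([] : List String), hlen8,
      List.map_map]
    simp only [Function.comp_def]
    rw [sum_map_sum_comm]
    -- A: the loop is the column-wise sum of the three targeted checks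
    rw [pvALoop_eq_sum board i ((8 - (j + 1)).toNat) (j + 1) 0 1 (le_refl _)]
    congr 1
    refine congrArg List.sum (List.map_congr_left ?_)
    intro c hc
    rw [PySem.List.mem_pyRange_one] at hc
    -- per column: B's row scan equals A's three checks
    have hrow : ((PySem.List.pyRange 0 8 1).map
          (fun r => if PySem.List.pyGetD (PySem.List.pyGetD (board.take 8) r []) c "" = "Q"
                ∧ (r = i ∨ r - i = c - j ∨ i - r = c - j) then (1 : Int) else 0))
        = ((PySem.List.pyRange 0 8 1).map
          (fun r => if pvCell board r c = "Q" ∧ (r = i ∨ r - i = c - j ∨ i - r = c - j)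
            then (1 : Int) else 0)) := by
      refine List.map_congr_left ?_
      intro r hr
      rw [PySem.List.mem_pyRange_one] at hr
      rw [take8_row board r hr.1 hr.2 hlen, pvCell]
    rw [hrow, colSum_eq board c i (c - j) hi0 hi8 (by omega)]
    congr 1
    ring
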